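-- pv_equiv track=rewrite | github.com/rohan-zhangqi/RedisInActionExample | chapter7.py | string_to_score
-- ===== SOURCE A (Python) =====
-- def string_to_score(string, ignore_case=False):
--     if ignore_case:
--         string = string.lower()
--     # 1
--     # ord() 函数是 chr() 函数（对于8位的ASCII字符串）或 unichr() 函数（对于Unicode对象）的配对函数，
--     # 它以一个字符（长度为1的字符串）作为参数，返回对应的 ASCII 数值，或者 Unicode 数值，如果所给的 Unicode
--     # 字符超出了你的 Python 定义范围，则会引发一个 TypeError 的异常。
--     # 语法：ord(c)
--     # 参数：c -- 字符
--     # 返回值：返回值是对应的十进制整数。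
--     # 2
--     # map()会根据提供的函数对指定序列做映射。
--     # 第一个参数 function 以参数序列中的每一个元素调用 function 函数，返回包含每次 function 函数返回值的新列表。
--     # 参数：
--     # function -- 函数
--     # iterable -- 一个或多个序列
--     # 返回值：
--     # Python 2.x 返回列表。
--     # Python 3.x 返回迭代器
--     # 3
--     # 描述：list() 方法用于将元组转换为列表。
--     # 注：元组与列表是非常类似的，区别在于元组的元素值不能修改，元组是放在括号中，列表是放于方括号中。
--     # 语法：list(tup)
--     # 参数：tup -- 要转换为列表的元组。
--     # 返回值:返回列表。
--     pieces = list(map(ord, string[:6]))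
--     while len(pieces) < 6:
--         pieces.append(-1)
--
--     score = 0
--     for piece in pieces:
--         score = score * 257 + piece + 1
--
--     return score * 2 + (len(string) > 6)
-- ===== SOURCE B (Python) =====
-- def string_to_score(string, ignore_case=False):
--     if ignore_case:
--         string = string.lower()
--
--     def pack(chars):
--         # recursion on the string structure from the right: no padding list,
--         # the empty string packs to 0
--         if not chars:
--             return 0
--         return pack(chars[:-1]) * 257 + ord(chars[-1]) + 1
--
--     prefix = string[:6]
--     base = pack(prefix) * 257 ** (6 - len(prefix))
--     return base * 2 + (len(string) > 6)
-- ===== Notes on version B (the rewrite author's own statement) =====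
-- stated objective: simpler
-- what changed: Drops the padded 6-element pieces list and the forward accumulator loop entirely: B recursively packs only the characters actually present in string[:6] (structural recursion from the right, no -1 sentinels) and then shifts once by 257**(6-len(prefix)) for the missing slots.
import Mathlib
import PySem

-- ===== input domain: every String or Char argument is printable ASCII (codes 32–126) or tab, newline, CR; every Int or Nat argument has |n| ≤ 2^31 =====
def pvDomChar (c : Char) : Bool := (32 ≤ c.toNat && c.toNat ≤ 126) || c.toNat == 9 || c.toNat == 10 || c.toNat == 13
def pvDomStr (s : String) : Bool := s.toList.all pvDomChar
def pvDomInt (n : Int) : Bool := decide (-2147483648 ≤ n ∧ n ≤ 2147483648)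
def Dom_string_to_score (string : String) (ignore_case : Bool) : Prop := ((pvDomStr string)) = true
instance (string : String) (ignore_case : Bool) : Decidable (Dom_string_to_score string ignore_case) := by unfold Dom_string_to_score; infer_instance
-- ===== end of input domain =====

-- B drops A's padded -1 list and accumulator loop: it packs only the present characters by
-- structural recursion from the right and shifts once for the missing slots (simpler).

-- ===== PORT A =====
-- while len(pieces) < 6: pieces.append(-1)
def pvPad (ps : List Int) : List Int :=
  if ps.length < 6 then pvPad (ps ++ [-1]) else ps
termination_by 6 - ps.length
decreasing_by simp_all; omega

def string_to_score (string : String) (ignore_case : Bool) : Int :=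
  let cs : List Char := if ignore_case then PySem.Chars.lower string.toList else string.toList
  let pieces : List Int := (PySem.List.slice cs none (some 6)).map (fun c => (c.toNat : Int))
  let pieces := pvPad pieces
  let score : Int := pieces.foldl (fun score piece => score * 257 + piece + 1) 0
  score * 2 + (if cs.length > 6 then 1 else 0)

-- ===== PORT B =====
-- pack(chars) = pack(chars[:-1]) * 257 + ord(chars[-1]) + 1, pack('') = 0
def pvPack : List Char → Int
  | [] => 0
  | c :: cs => pvPack ((c :: cs).dropLast) * 257 + (((c :: cs).getLast (by simp)).toNat : Int) + 1
termination_by l => l.length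
decreasing_by simp [List.length_dropLast]

def string_to_score_alt (string : String) (ignore_case : Bool) : Int :=
  let cs : List Char := if ignore_case then PySem.Chars.lower string.toList else string.toList
  let prefix_ : List Char := PySem.List.slice cs none (some 6)
  let base : Int := pvPack prefix_ * 257 ^ (6 - prefix_.length)
  base * 2 + (if cs.length > 6 then 1 else 0)

-- ===== PRECONDITION & SPEC =====
def Spec_string_to_score (string : String) (ignore_case : Bool) (out : Int) : Prop := out = string_to_score_alt string ignore_case
instance (string : String) (ignore_case : Bool) (out : Int) : Decidable (Spec_string_to_score string ignore_case out) := by unfold Spec_string_to_score; infer_instance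

-- ===== CLAIM (what is proved, stated in full; the proofs are below) =====
def Claim_equal_string_to_score : Prop := ∀ (string : String) (ignore_case : Bool), Dom_string_to_score string ignore_case → Spec_string_to_score string ignore_case (string_to_score string ignore_case)

-- ===== LEMMAS AND PROOFS =====

-- A's padded Horner fold equals B's pack-then-shift on any prefix of length ≤ 6
theorem pv_core (ps : List Char) (h : ps.length ≤ 6) :
    (pvPad (ps.map (fun c => (c.toNat : Int)))).foldl (fun score piece => score * 257 + piece + 1) 0
      = pvPack ps * 257 ^ (6 - ps.length) := by
  match ps with
  | [] => simp [pvPad, pvPack]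
  | [a] => simp [pvPad, pvPack]; try ring
  | [a,b] => simp [pvPad, pvPack]; try ring
  | [a,b,c] => simp [pvPad, pvPack]; try ring
  | [a,b,c,d] => simp [pvPad, pvPack]; try ring
  | [a,b,c,d,e] => simp [pvPad, pvPack]; try ring
  | [a,b,c,d,e,f] => simp [pvPad, pvPack]; try ring
  | a::b::c::d::e::f::g::t => simp at h; omega

-- ===== VERDICT (by name: the statement is the Claim_ definition above) =====
theorem string_to_score_spec : Claim_equal_string_to_score := by
  intro s ic _
  unfold Spec_string_to_score string_to_score string_to_score_alt
  have := pv_core (PySem.List.slice (if ic then PySem.Chars.lower s.toList else s.toList) none (some 6))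
    (by simp [PySem.List.slice_to])
  simp only [this]
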